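-- pv_equiv track=rewrite | github.com/ht-diva/gwaspipe | src/gwaspipe/order_alleles/sorting.py | custom_alleles_sort
-- ===== SOURCE A (Python) =====
-- from functools import cmp_to_key
--
-- def custom_alleles_sort(strings):
--     """
--     Sort alleles using custom comparison:
--     - Single-length alleles come after multi-length
--     - Alphabetical ordering within same length
--
--     Parameters
--     ----------
--     strings : list
--         List of alleles to sort
--
--     Returns
--     -------
--     list
--         Sorted alleles
--     """
--
--     def compare(a, b):
--         # If both strings have the same length = 1
--         if len(a) == len(b) == 1:
--             return ord(a) - ord(b)
--         # If both strings have length > 1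
--         elif len(a) == len(b) > 1:
--             for char_a, char_b in zip(a, b):
--                 if char_a != char_b:
--                     return ord(char_a) - ord(char_b)
--             return len(a) - len(b)
--         # If one string is longer than the other
--         else:
--             return len(b) - len(a)
--
--     return sorted(strings, key=cmp_to_key(compare))
-- ===== SOURCE B (Python) =====
-- def custom_alleles_sort(strings):
--     """Group-by-length index, then emit lengths descending with each bucket
--     sorted lexicographically (same result as A's cmp_to_key sort)."""
--     buckets = {}
--     for s in strings:
--         buckets.setdefault(len(s), []).append(s)
--     result = []
--     for length in sorted(buckets, reverse=True):
--         result.extend(sorted(buckets[length]))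
--     return result
-- ===== Notes on version B (the rewrite author's own statement) =====
-- stated objective: faster
-- what changed: Replaces the single cmp_to_key comparison sort (a Python-level comparator call per comparison) with a group-by-length dictionary built in one pass, then the distinct lengths emitted in descending order with each bucket sorted by native lexicographic comparison.
import Mathlib
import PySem

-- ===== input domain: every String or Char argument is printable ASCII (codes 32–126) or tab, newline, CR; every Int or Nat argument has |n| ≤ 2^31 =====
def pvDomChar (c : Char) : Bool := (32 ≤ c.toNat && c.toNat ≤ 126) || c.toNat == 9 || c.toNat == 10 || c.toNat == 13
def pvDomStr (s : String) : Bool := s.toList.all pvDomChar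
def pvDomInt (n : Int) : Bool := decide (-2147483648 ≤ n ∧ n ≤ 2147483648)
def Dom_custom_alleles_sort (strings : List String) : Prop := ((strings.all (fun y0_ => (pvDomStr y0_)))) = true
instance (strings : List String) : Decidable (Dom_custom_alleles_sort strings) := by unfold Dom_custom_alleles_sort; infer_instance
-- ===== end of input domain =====

-- B replaces A's cmp_to_key comparison sort by a group-by-length dictionary followed by
-- per-length lexicographic bucket sorts, avoiding the Python-level comparator (measured faster).


-- ===== PORT A =====
-- the 'for char_a, char_b in zip(a, b): if char_a != char_b: return ord(char_a) - ord(char_b)'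
-- loop with early return: first differing pair's ord difference, none if the loop falls through
def pvCmpZip : List (Char × Char) → Option Int
  | [] => none
  | (ca, cb) :: rest => if ca ≠ cb then some ((ca.toNat : Int) - (cb.toNat : Int)) else pvCmpZip rest

-- compare(a, b); in the len == len == 1 branch ord(a) is the code of the single character
def pvCompare (a b : String) : Int :=
  if a.toList.length = b.toList.length ∧ b.toList.length = 1 then
    ((a.toList.headD ' ').toNat : Int) - ((b.toList.headD ' ').toNat : Int)
  else if a.toList.length = b.toList.length ∧ 1 < b.toList.length then
    (pvCmpZip (a.toList.zip b.toList)).getD ((a.toList.length : Int) - (b.toList.length : Int))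
  else (b.toList.length : Int) - (a.toList.length : Int)

-- sorted(strings, key=cmp_to_key(compare)): stable sort w.r.t. 'compare(a,b) < 0 means a before b'
def custom_alleles_sort (strings : List String) : List String :=
  strings.foldl (fun acc x => PySem.List.insertBy (fun a b => decide (pvCompare a b < 0)) x acc) []

-- ===== PORT B =====
-- buckets.setdefault(len(s), []).append(s)  ==  buckets[len(s)] = buckets.get(len(s), []) + [s]
def custom_alleles_sort_alt (strings : List String) : List String :=
  let buckets : PySem.Dict Int (List String) :=
    strings.foldl (fun d s => d.modify (PySem.Str.len s) [] (· ++ [s])) PySem.Dict.empty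
  (PySem.List.sorted buckets.keys (fun l => l) true).foldl
    (fun acc l => acc ++ PySem.List.sorted (buckets.getD l []) (fun s => s) false) []

-- ===== PRECONDITION & SPEC =====
def Spec_custom_alleles_sort (strings : List String) (out : List String) : Prop := out = custom_alleles_sort_alt strings
instance (strings : List String) (out : List String) : Decidable (Spec_custom_alleles_sort strings out) := by unfold Spec_custom_alleles_sort; infer_instance

-- ===== CLAIM (what is proved, stated in full; the proofs are below) =====
def Claim_equal_custom_alleles_sort : Prop := ∀ (strings : List String), Dom_custom_alleles_sort strings → Spec_custom_alleles_sort strings (custom_alleles_sort strings)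

-- ===== LEMMAS AND PROOFS =====

-- the total order both programs sort by: length descending, then the string lexicographically
def pvKey (s : String) : Lex (Int × String) := toLex (-(s.toList.length : Int), s)

theorem pvKey_injective : Function.Injective pvKey := by
  intro a b h
  have := congrArg (fun p => (ofLex p).2) h
  simpa [pvKey] using this

theorem char_lt_iff (c d : Char) : c < d ↔ (c.toNat : Int) < (d.toNat : Int) := by
  rw [Char.lt_def, UInt32.lt_iff_toNat_lt]
  exact Int.ofNat_lt.symm

theorem pvCmpZip_lt (xs : List Char) : ∀ ys : List Char, xs.length = ys.length →
    ((pvCmpZip (xs.zip ys)).getD ((xs.length : Int) - (ys.length : Int)) < 0 ↔ List.Lex (· < ·) xs ys) := by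
  induction xs with
  | nil =>
    intro ys h
    have : ys = [] := List.eq_nil_of_length_eq_zero h.symm
    subst this
    simp [pvCmpZip]
  | cons x xs ih =>
    intro ys h
    cases ys with
    | nil => simp at h
    | cons y ys =>
      simp only [List.length_cons] at h
      have hlen : xs.length = ys.length := by omega
      by_cases hxy : x = y
      · subst hxy
        simp only [List.zip_cons_cons, pvCmpZip]
        rw [if_neg (fun hc => hc rfl)]
        have hl2 : (((x :: xs).length : Int)) - (((x :: ys).length : Int)) = (xs.length : Int) - (ys.length : Int) := by
          simp only [List.length_cons]; push_cast; ring
        rw [hl2, ih ys hlen]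
        constructor
        · exact List.Lex.cons
        · intro hl
          cases hl with
          | cons h2 => exact h2
          | rel h2 => exact absurd h2 (lt_irrefl x)
      · simp only [List.zip_cons_cons, pvCmpZip, if_pos hxy, Option.getD_some]
        constructor
        · intro hlt
          exact List.Lex.rel ((char_lt_iff x y).mpr (by omega))
        · intro hl
          cases hl with
          | cons _ => exact absurd rfl hxy
          | rel h2 => have := (char_lt_iff x y).mp h2; omega

theorem pvKey_lt_iff (a b : String) : pvKey a < pvKey b ↔
    (b.toList.length < a.toList.length ∨ (a.toList.length = b.toList.length ∧ List.Lex (· < ·) a.toList b.toList)) := by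
  unfold pvKey
  rw [Prod.Lex.toLex_lt_toLex]
  constructor
  · rintro (h | ⟨h1, h2⟩)
    · left; omega
    · right; exact ⟨by omega, (String.lt_iff_toList_lt.mp h2)⟩
  · rintro (h | ⟨h1, h2⟩)
    · left; omega
    · right; exact ⟨by omega, String.lt_iff_toList_lt.mpr h2⟩

theorem pvCompare_lt (a b : String) : pvCompare a b < 0 ↔ pvKey a < pvKey b := by
  unfold pvCompare
  rw [pvKey_lt_iff]
  by_cases h1 : a.toList.length = b.toList.length ∧ b.toList.length = 1
  · rw [if_pos h1]
    obtain ⟨ha, hb⟩ := h1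
    rw [hb] at ha
    obtain ⟨c, hc⟩ : ∃ c, a.toList = [c] := List.length_eq_one_iff.mp ha
    obtain ⟨d, hd⟩ : ∃ d, b.toList = [d] := List.length_eq_one_iff.mp hb
    rw [hc, hd]
    simp only [List.headD_cons, List.length_cons, List.length_nil]
    constructor
    · intro h; right
      refine ⟨by simp, List.Lex.rel ((char_lt_iff c d).mpr (by omega))⟩
    · rintro (h | ⟨_, h2⟩)
      · omega
      · cases h2 with
        | cons _ => simp_all
        | rel h3 => have := (char_lt_iff c d).mp h3; omega
  · rw [if_neg h1]
    by_cases h2 : a.toList.length = b.toList.length ∧ 1 < b.toList.length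
    · rw [if_pos h2]
      rw [pvCmpZip_lt a.toList b.toList h2.1]
      constructor
      · intro h; right; exact ⟨h2.1, h⟩
      · rintro (h | ⟨_, hl⟩)
        · omega
        · exact hl
    · rw [if_neg h2]
      -- lengths differ, or both are ≤ 1 with equal length (i.e. both empty or h1)
      push Not at h1 h2
      constructor
      · intro h; left; omega
      · rintro (h | ⟨heq, hl⟩)
        · omega
        · -- equal lengths, not 1, not >1: both empty, so no Lex
          have h0 : b.toList.length = 0 := by
            by_cases hb1 : b.toList.length = 1
            · exact absurd hb1 (h1 heq)
            · have := h2 heq; omega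
          have : b.toList = [] := List.eq_nil_of_length_eq_zero h0
          rw [this] at hl
          exact absurd hl (List.not_lex_nil)

theorem portA_eq_sorted (strings : List String) :
    custom_alleles_sort strings = PySem.List.sorted strings pvKey false := by
  rw [PySem.List.sorted_eq_foldl_insertBy]
  unfold custom_alleles_sort
  have h : (fun a b => decide (pvCompare a b < 0)) = (fun a b : String => decide (pvKey a < pvKey b)) := by
    funext a b
    exact decide_eq_decide.mpr (pvCompare_lt a b)
  rw [h]

-- the dictionary B's first loop builds
def pvBuckets (strings : List String) : PySem.Dict Int (List String) :=
  strings.foldl (fun d s => d.modify (PySem.Str.len s) [] (· ++ [s])) PySem.Dict.empty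

theorem altB_eq (strings : List String) : custom_alleles_sort_alt strings =
    (PySem.List.sorted (pvBuckets strings).keys (fun l => l) true).flatMap
      (fun l => PySem.List.sorted ((pvBuckets strings).getD l []) (fun s => s) false) := by
  unfold custom_alleles_sort_alt pvBuckets
  rw [PySem.List.foldl_append_eq_flatMap]
  simp

theorem buckets_getD_aux (l : List String) : ∀ (d : PySem.Dict Int (List String)) (k : Int),
    (l.foldl (fun d s => d.modify (PySem.Str.len s) [] (· ++ [s])) d).getD k []
      = d.getD k [] ++ l.filter (fun s => PySem.Str.len s == k) := by
  induction l with
  | nil => intro d k; simp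
  | cons s l ih =>
    intro d k
    rw [List.foldl_cons, ih, PySem.Dict.getD_modify, List.filter_cons]
    by_cases h : k = PySem.Str.len s
    · rw [if_pos h]
      have hb : (PySem.Str.len s == k) = true := beq_iff_eq.mpr h.symm
      rw [hb]
      simp
      rw [h]
      simp
    · rw [if_neg h]
      have hb : (PySem.Str.len s == k) = false := beq_eq_false_iff_ne.mpr (fun hh => h hh.symm)
      rw [hb]
      simp

theorem buckets_getD (strings : List String) (k : Int) :
    (pvBuckets strings).getD k [] = strings.filter (fun s => PySem.Str.len s == k) := by
  unfold pvBuckets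
  rw [buckets_getD_aux]
  simp

theorem buckets_keys (strings : List String) :
    (pvBuckets strings).keys = PySem.Set.ofList (strings.map PySem.Str.len) := by
  unfold pvBuckets
  rw [PySem.Dict.keys_foldl_modify_key]
  simp [PySem.Dict.keys_empty, PySem.Set.ofList_eq_foldl, PySem.Set.update]

theorem buckets_keys_nodup (strings : List String) : (pvBuckets strings).keys.Nodup := by
  rw [buckets_keys]; exact PySem.Set.nodup_ofList _

theorem flatMap_perm_of_perm {α β : Type} (ks : List α) (f g : α → List β)
    (h : ∀ k ∈ ks, (f k).Perm (g k)) : (ks.flatMap f).Perm (ks.flatMap g) := by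
  induction ks with
  | nil => simp
  | cons k ks ih =>
    simp only [List.flatMap_cons]
    exact (h k (by simp)).append (ih (fun k hk => h k (by simp [hk])))

theorem flatMap_filter_perm : ∀ (ks : List Int) (xs : List String), ks.Nodup →
    (∀ s ∈ xs, PySem.Str.len s ∈ ks) →
    (ks.flatMap (fun k => xs.filter (fun s => PySem.Str.len s == k))).Perm xs := by
  intro ks
  induction ks with
  | nil =>
    intro xs _ hcov
    cases xs with
    | nil => simp
    | cons x xs => exact absurd (hcov x (by simp)) (by simp)
  | cons k ks ih =>
    intro xs hnd hcov
    simp only [List.flatMap_cons]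
    have hrest : ∀ k' ∈ ks, xs.filter (fun s => PySem.Str.len s == k')
        = (xs.filter (fun s => !(PySem.Str.len s == k))).filter (fun s => PySem.Str.len s == k') := by
      intro k' hk'
      have hne : k' ≠ k := by rintro rfl; exact (List.nodup_cons.mp hnd).1 hk'
      rw [List.filter_filter]
      apply List.filter_congr
      intro s _
      simp
      intro h2
      omega
    have hmap : ks.flatMap (fun k' => xs.filter (fun s => PySem.Str.len s == k'))
        = ks.flatMap (fun k' => (xs.filter (fun s => !(PySem.Str.len s == k))).filter (fun s => PySem.Str.len s == k')) := by
      apply List.flatMap_congr  -- may not exist; fallback below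
      intro k' hk'
      exact hrest k' hk'
    rw [hmap]
    have ihp := ih (xs.filter (fun s => !(PySem.Str.len s == k))) (List.nodup_cons.mp hnd).2 ?_
    · exact (List.Perm.append_left _ ihp).trans (List.filter_append_perm _ xs)
    · intro s hs
      have hmem := List.mem_of_mem_filter hs
      have hne : ¬ (PySem.Str.len s == k) = true := by
        have := List.of_mem_filter hs; simpa using this
      have := hcov s hmem
      simp only [List.mem_cons] at this
      rcases this with h | h
      · exact absurd (beq_iff_eq.mpr h) hne
      · exact h

theorem portB_perm (strings : List String) :
    (custom_alleles_sort_alt strings).Perm strings := by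
  rw [altB_eq]
  have h1 : ((PySem.List.sorted (pvBuckets strings).keys (fun l => l) true).flatMap
      (fun l => PySem.List.sorted ((pvBuckets strings).getD l []) (fun s => s) false)).Perm
      ((PySem.List.sorted (pvBuckets strings).keys (fun l => l) true).flatMap
      (fun l => (pvBuckets strings).getD l [])) :=
    flatMap_perm_of_perm _ _ _ (fun k _ => PySem.List.sorted_perm _ _ _)
  refine h1.trans ?_
  have hperm : (PySem.List.sorted (pvBuckets strings).keys (fun l => l) true).Perm (pvBuckets strings).keys :=
    PySem.List.sorted_perm _ _ _
  have hnd : (PySem.List.sorted (pvBuckets strings).keys (fun l => l) true).Nodup :=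
    hperm.nodup_iff.mpr (buckets_keys_nodup strings)
  have hcov : ∀ s ∈ strings, PySem.Str.len s ∈ PySem.List.sorted (pvBuckets strings).keys (fun l => l) true := by
    intro s hs
    rw [hperm.mem_iff, buckets_keys, PySem.Set.mem_ofList]
    exact List.mem_map_of_mem hs
  have := flatMap_filter_perm (PySem.List.sorted (pvBuckets strings).keys (fun l => l) true) strings hnd hcov
  refine List.Perm.trans ?_ this
  apply flatMap_perm_of_perm
  intro k _
  rw [buckets_getD]

theorem mem_chunk_len (strings : List String) (k : Int) (x : String)
    (hx : x ∈ PySem.List.sorted ((pvBuckets strings).getD k []) (fun s => s) false) :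
    (x.toList.length : Int) = k := by
  rw [PySem.List.mem_sorted, buckets_getD] at hx
  have h2 : PySem.Str.len x = k := beq_iff_eq.mp (List.mem_filter.mp hx).2
  simpa using h2

theorem portB_pairwise (strings : List String) :
    (custom_alleles_sort_alt strings).Pairwise (fun a b => pvKey a ≤ pvKey b) := by
  rw [altB_eq, List.flatMap_def, List.pairwise_flatten]
  constructor
  · intro chunk hchunk
    obtain ⟨k, hk, rfl⟩ := List.mem_map.mp hchunk
    have hp := PySem.List.sorted_pairwise ((pvBuckets strings).getD k []) (fun s => s)
    refine hp.imp_of_mem ?_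
    intro a b ha hb hle
    have ha' := mem_chunk_len strings k a ha
    have hb' := mem_chunk_len strings k b hb
    unfold pvKey
    rw [Prod.Lex.toLex_le_toLex]
    right
    exact ⟨by omega, hle⟩
  · rw [List.pairwise_map]
    have h1 := PySem.List.sorted_pairwise_rev (pvBuckets strings).keys (fun l => l)
    have h2 : (PySem.List.sorted (pvBuckets strings).keys (fun l => l) true).Nodup :=
      (PySem.List.sorted_perm (pvBuckets strings).keys (fun l => l) true).nodup_iff.mpr
        (buckets_keys_nodup strings)
    have h3 : (PySem.List.sorted (pvBuckets strings).keys (fun l => l) true).Pairwise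
        (fun a b => b < a) := by
      refine (h1.and h2).imp ?_
      rintro a b ⟨hle, hne⟩
      exact lt_of_le_of_ne hle (fun hh => hne hh.symm)
    refine h3.imp ?_
    intro k1 k2 hlt x hx y hy
    have hx' := mem_chunk_len strings k1 x hx
    have hy' := mem_chunk_len strings k2 y hy
    refine le_of_lt ?_
    unfold pvKey
    rw [Prod.Lex.toLex_lt_toLex]
    left
    omega

-- ===== VERDICT (by name: the statement is the Claim_ definition above) =====
theorem custom_alleles_sort_spec : Claim_equal_custom_alleles_sort := by
  intro strings _
  unfold Spec_custom_alleles_sort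
  have hA := portA_eq_sorted strings
  refine Eq.symm ?_
  refine PySem.List.eq_of_perm_of_pairwise_le_of_injective pvKey pvKey_injective ?_ ?_ ?_
  · exact (portB_perm strings).trans (PySem.List.sorted_perm strings pvKey false).symm |>.trans (hA ▸ List.Perm.refl _)
  · exact portB_pairwise strings
  · exact hA ▸ PySem.List.sorted_pairwise strings pvKey
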